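-- pv_equiv track=rewrite | github.com/ZeyadWaleed7/AI-Testdoc-Agent | ai_agent/enhanced_context.py | _get_import_paths
-- ===== SOURCE A (Python) =====
-- from typing import Dict, List, Any, Optional, Tuple
--
-- def _get_import_paths(file_path: str, language: str) -> List[str]:
--     """Get possible import paths for the file"""
--     if not file_path:
--         return []
--
--     # Extract directory structure
--     dir_parts = file_path.split('/')
--     import_paths = []
--
--     # Build relative import paths
--     for i in range(len(dir_parts) - 1):
--         relative_path = '/'.join(dir_parts[i:-1])
--         if relative_path:
--             import_paths.append(relative_path)
--
--     # Add absolute paths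
--     import_paths.append('')
--     import_paths.append('.')
--
--     return import_paths
-- ===== SOURCE B (Python) =====
-- def _get_import_paths(file_path: str, language: str):
--     """Get possible import paths for the file (single back-to-front accumulation pass)."""
--     if not file_path:
--         return []
--
--     segs = file_path.split('/')[:-1]
--     suffixes = []
--     current = None
--     for seg in reversed(segs):
--         current = seg if current is None else seg + '/' + current
--         if current:
--             suffixes.append(current)
--     return list(reversed(suffixes)) + ['', '.']
-- ===== Notes on version B (the rewrite author's own statement) =====
-- stated objective: faster
-- what changed: Instead of slicing and re-joining dir_parts[i:-1] for every index i, B makes one back-to-front pass over the segments, extending a running suffix string by one segment per step and collecting the non-empty suffixes, then reverses to A's longest-first order.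
import Mathlib
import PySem

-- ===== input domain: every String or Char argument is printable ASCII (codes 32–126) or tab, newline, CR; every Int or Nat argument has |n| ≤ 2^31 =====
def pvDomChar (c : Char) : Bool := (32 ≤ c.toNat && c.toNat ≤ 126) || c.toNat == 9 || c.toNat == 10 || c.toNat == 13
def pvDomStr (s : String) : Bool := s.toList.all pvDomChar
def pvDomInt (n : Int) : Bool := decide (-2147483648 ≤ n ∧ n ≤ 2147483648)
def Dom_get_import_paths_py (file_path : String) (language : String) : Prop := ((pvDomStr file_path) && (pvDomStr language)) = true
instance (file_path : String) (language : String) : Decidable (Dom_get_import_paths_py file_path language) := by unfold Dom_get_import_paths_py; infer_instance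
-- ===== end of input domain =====

-- B replaces A's per-index slice-and-join (quadratic work) by one back-to-front accumulation
-- pass building each suffix string from the previous one; same return value, proved equal.


-- ===== PORT A =====
def get_import_paths_py (file_path : String) (language : String) : List String :=
  if file_path = "" then []
  else
    let dir_parts := (PySem.Str.split? file_path "/").getD []
    let import_paths :=
      (PySem.List.pyRange 0 (PySem.List.len dir_parts - 1) 1).foldl
        (fun acc i =>
          let relative_path := PySem.Str.join "/" (PySem.List.slice dir_parts (some i) (some (-1)))
          if relative_path ≠ "" then acc ++ [relative_path] else acc)
        []
    import_paths ++ [""] ++ ["."]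

-- ===== PORT B =====
def get_import_paths_py_alt (file_path : String) (language : String) : List String :=
  if file_path = "" then []
  else
    let segs := PySem.List.slice ((PySem.Str.split? file_path "/").getD []) none (some (-1))
    let st :=
      segs.reverse.foldl
        (fun (st : List String × Option String) seg =>
          let current := match st.2 with
            | none => seg
            | some c => seg ++ "/" ++ c
          (if current ≠ "" then st.1 ++ [current] else st.1, some current))
        ([], none)
    st.1.reverse ++ ["", "."]

-- ===== PRECONDITION & SPEC =====
def Spec_get_import_paths_py (file_path : String) (language : String) (out : List String) : Prop := out = get_import_paths_py_alt file_path language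
instance (file_path : String) (language : String) (out : List String) : Decidable (Spec_get_import_paths_py file_path language out) := by unfold Spec_get_import_paths_py; infer_instance

-- ===== CLAIM (what is proved, stated in full; the proofs are below) =====
def Claim_equal_get_import_paths_py : Prop := ∀ (file_path : String) (language : String), Dom_get_import_paths_py file_path language → Spec_get_import_paths_py file_path language (get_import_paths_py file_path language)

-- ===== LEMMAS AND PROOFS =====

-- shorthand for '/'.join used only in the proofs
def pvJ (l : List String) : String := PySem.Str.join "/" l

-- the nonempty joins of the suffixes of segs, longest first (A's loop body, recursively)
def pvF : List String → List String
  | [] => []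
  | s :: r => (if pvJ (s :: r) ≠ "" then [pvJ (s :: r)] else []) ++ pvF r

-- the same list shortest-first (what B's fold accumulates)
def pvFb : List String → List String
  | [] => []
  | s :: r => pvFb r ++ (if pvJ (s :: r) ≠ "" then [pvJ (s :: r)] else [])

lemma pv_join_singleton (s : String) : pvJ [s] = s := by
  apply String.toList_inj.mp
  simp [pvJ, PySem.Str.toList_join, PySem.Chars.join_singleton]

lemma pv_join_cons (s t : String) (r : List String) : pvJ (s :: t :: r) = s ++ "/" ++ pvJ (t :: r) := by
  apply String.toList_inj.mp
  simp [pvJ, PySem.Str.toList_join, PySem.Chars.join_cons_cons]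

-- xs[i:-1] for a natural i is a drop of the dropLast
lemma pv_slice_drop (xs : List String) (i : Nat) :
    PySem.List.slice xs (some (i : Int)) (some (-1)) = (xs.dropLast).drop i := by
  simp only [PySem.List.slice, PySem.List.clampIdx]
  have h1 : ((-1 : Int) < 0) = True := by simp
  simp only [h1, if_true]
  by_cases h0 : xs = []
  · simp [h0]
  · have hlen : 0 < xs.length := List.length_pos_iff.mpr h0
    have h2 : ¬ ((xs.length : Int) + -1 < 0) := by omega
    have h3 : ¬ ((i : Int) < 0) := by omega
    simp only [if_neg h2, if_neg h3]
    have h4 : ((xs.length : Int) + -1).toNat = xs.length - 1 := by omega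
    have h5 : ((i : Int)).toNat = i := by omega
    rw [h4, h5, List.dropLast_eq_take, List.drop_take]
    by_cases hi : i ≤ xs.length
    · rw [min_eq_left hi]
    · rw [min_eq_right (by omega)]
      have hz : xs.length - 1 - xs.length = 0 := by rw [Nat.sub_sub]; omega
      rw [hz]
      simp
      omega

-- A's loop over the indices of segs computes pvF segs
lemma pv_A_loop (segs : List String) (acc : List String) :
    (List.range segs.length).foldl
      (fun a k => if pvJ (segs.drop k) ≠ "" then a ++ [pvJ (segs.drop k)] else a) acc
      = acc ++ pvF segs := by
  induction segs generalizing acc with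
  | nil => simp [pvF]
  | cons s r ih =>
    rw [List.length_cons, List.range_succ_eq_map, List.foldl_cons, List.foldl_map]
    simp only [List.drop_zero, List.drop_succ_cons]
    rw [ih]
    by_cases h : pvJ (s :: r) ≠ "" <;> simp [pvF, h, List.append_assoc]

-- B's fold over segs.reverse: accumulated list and running suffix
lemma pv_B_fold (segs : List String) :
    segs.reverse.foldl
      (fun (st : List String × Option String) seg =>
        let current := match st.2 with
          | none => seg
          | some c => seg ++ "/" ++ c
        (if current ≠ "" then st.1 ++ [current] else st.1, some current))
      ([], none)
      = (pvFb segs, match segs with | [] => none | _ :: _ => some (pvJ segs)) := by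
  induction segs with
  | nil => simp [pvFb]
  | cons s r ih =>
    rw [List.reverse_cons, List.foldl_append, ih, List.foldl_cons, List.foldl_nil]
    have hcur : (match (match r with | [] => (none : Option String) | _ :: _ => some (pvJ r)) with
        | none => s
        | some c => s ++ "/" ++ c) = pvJ (s :: r) := by
      cases r with
      | nil => simp [pv_join_singleton]
      | cons t u => simp [pv_join_cons]
    simp only [hcur]
    by_cases h : pvJ (s :: r) ≠ "" <;> simp [pvFb, h]

lemma pv_rev (segs : List String) : (pvFb segs).reverse = pvF segs := by
  induction segs with
  | nil => simp [pvFb, pvF]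
  | cons s r ih =>
    by_cases h : pvJ (s :: r) ≠ "" <;> simp [pvFb, pvF, h, ih]

-- ===== VERDICT (by name: the statement is the Claim_ definition above) =====
theorem get_import_paths_py_spec : Claim_equal_get_import_paths_py := by
  intro file_path language _
  unfold Spec_get_import_paths_py get_import_paths_py get_import_paths_py_alt
  by_cases hfp : file_path = ""
  · simp [hfp]
  · simp only [if_neg hfp]
    set parts := (PySem.Str.split? file_path "/").getD [] with hparts
    -- A side: turn the pyRange/slice loop into pv_A_loop's shape
    rw [PySem.List.slice_to_neg_one, pv_B_fold]
    rw [PySem.List.len_eq, PySem.List.pyRange_one]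
    have hm : (((parts.length : Int) - 1) - 0).toNat = parts.dropLast.length := by
      rw [List.length_dropLast]; omega
    rw [hm, List.foldl_map]
    simp only [zero_add, pv_slice_drop]
    have := pv_A_loop parts.dropLast []
    simp only [pvJ] at this
    rw [this]
    rw [← pv_rev parts.dropLast]
    simp only [List.append_assoc, List.cons_append, List.nil_append]
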